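-- pv_equiv track=rewrite | github.com/Sandeep-yadavz/leetcode | 1885-count-number-of-homogenous-substrings/1885-count-number-of-homogenous-substrings.py | countHomogenous
-- ===== SOURCE A (Python) =====
-- def countHomogenous(s: str) -> int:
--     d={}
--     s+=" "
--     temp=""
--     mod=10**9+7
--     for i in range(len(s)-1):
--         if s[i]==s[i+1]:
--             temp+=s[i]
--         else:
--             temp+=s[i]
--             d[temp]=1+d.get(temp,0)
--             temp=""
--     ans=0
--     for i in d:
--         ans+=(d[i])*(len(i)*(len(i)+1)//2)%mod
--     return ans
-- ===== SOURCE B (Python) =====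
-- def countHomogenous(s: str) -> int:
--     mod = 10 ** 9 + 7
--     counts = {}
--     i = 0
--     n = len(s)
--     while i < n:
--         j = i
--         while j < n and s[j] == s[i]:
--             j += 1
--         key = (s[i], j - i)
--         counts[key] = counts.get(key, 0) + 1
--         i = j
--     return sum(c * (L * (L + 1) // 2) % mod for (_, L), c in counts.items())
-- ===== Notes on version B (the rewrite author's own statement) =====
-- stated objective: alternative
-- what changed: B makes a two-pointer pass collecting maximal runs as (char, length) pairs instead of growing a temp string character by character and keying the dict by the run string; the per-group (count*L(L+1)//2)%mod summation is unchanged.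
-- intended difference: On strings whose last character is a space, A returns a value that omits the trailing run of spaces entirely (its sentinel ' ' merges with that run and it is never flushed), e.g. A(' ') = 0; B counts it as a normal run (B(' ') = 1), which is the intended count of homogenous substrings. — e.g. on countHomogenous(" "): A returns 0, B returns 1
import Mathlib
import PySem

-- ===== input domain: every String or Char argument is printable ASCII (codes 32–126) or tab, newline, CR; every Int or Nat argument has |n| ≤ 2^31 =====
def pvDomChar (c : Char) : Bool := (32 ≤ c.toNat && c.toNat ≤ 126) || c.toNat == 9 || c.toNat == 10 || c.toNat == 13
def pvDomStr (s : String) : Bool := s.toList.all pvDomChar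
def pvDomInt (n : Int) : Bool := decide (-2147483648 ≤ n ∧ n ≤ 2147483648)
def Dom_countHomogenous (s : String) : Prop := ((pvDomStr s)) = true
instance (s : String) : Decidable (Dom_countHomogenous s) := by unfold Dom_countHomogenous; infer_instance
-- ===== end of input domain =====

-- B replaces A's char-by-char temp-string accumulation (string-keyed dict) by a
-- two-pointer pass over maximal runs keyed by (char, length); objective: alternative.

-- ===== PORT A =====
-- the for-i loop of A, comparing s[i] with s[i+1]; d = the dict, temp = the growing run string
def aLoop : PySem.Dict (List Char) Int → List Char → List Char → PySem.Dict (List Char) Int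
  | d, _, [] => d
  | d, _, [_] => d
  | d, temp, x :: y :: rest =>
    if x = y then aLoop d (temp ++ [x]) (y :: rest)
    else aLoop (PySem.Dict.insert d (temp ++ [x]) (1 + PySem.Dict.getD d (temp ++ [x]) 0)) [] (y :: rest)

def countHomogenous (s : String) : Int :=
  let cs := s.toList ++ [' ']        -- s += " "
  let d := aLoop PySem.Dict.empty [] cs
  d.items.foldl (fun ans p =>
    ans + PySem.Int.mod (p.2 * PySem.Int.floordiv ((p.1.length : Int) * ((p.1.length : Int) + 1)) 2) 1000000007) 0

-- ===== PORT B =====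
-- inner while: length of the run of c at the front, plus the rest of the list
def runLen (c : Char) : List Char → Nat × List Char
  | [] => (0, [])
  | x :: xs => if x = c then ((runLen c xs).1 + 1, (runLen c xs).2) else (0, x :: xs)

lemma runLen_snd_length_le (c : Char) (xs : List Char) : (runLen c xs).2.length ≤ xs.length := by
  induction xs with
  | nil => simp [runLen]
  | cons x xs ih =>
    simp only [runLen]
    split_ifs
    · simpa using Nat.le_succ_of_le ih
    · simp

-- outer while: the list of maximal runs as (char, length) pairs
def runsOf : List Char → List (Char × Nat)
  | [] => []
  | c :: rest => (c, (runLen c rest).1 + 1) :: runsOf (runLen c rest).2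
termination_by l => l.length
decreasing_by simpa using Nat.lt_succ_of_le (runLen_snd_length_le c rest)

def countHomogenous_alt (s : String) : Int :=
  let counts := (runsOf s.toList).foldl
    (fun (d : PySem.Dict (Char × Nat) Int) r => PySem.Dict.insert d r (PySem.Dict.getD d r 0 + 1))
    PySem.Dict.empty
  counts.items.foldl (fun acc p =>
    acc + PySem.Int.mod (p.2 * PySem.Int.floordiv ((p.1.2 : Int) * ((p.1.2 : Int) + 1)) 2) 1000000007) 0

-- ===== PRECONDITION & SPEC =====
-- On strings whose last character is a space, A's appended sentinel ' ' merges with the trailing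
-- run of spaces, which is therefore never flushed into the dict and is omitted from A's count
-- (A ' ' = 0); B counts that run normally (B ' ' = 1), the intended number of homogenous substrings.
def D_countHomogenous (s : String) : Prop := s.toList.getLast? = some ' '
instance (s : String) : Decidable (D_countHomogenous s) := by unfold D_countHomogenous; infer_instance

def Spec_countHomogenous (s : String) (out : Int) : Prop := ¬ D_countHomogenous s → out = countHomogenous_alt s
instance (s : String) (out : Int) : Decidable (Spec_countHomogenous s out) := by unfold Spec_countHomogenous; infer_instance

def pvDiffWitness_countHomogenous : String := " "
def pvDiffWitnessOut_countHomogenous : Int × Int := (0, 1)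

-- ===== CLAIM (what is proved, stated in full; the proofs are below) =====
def Claim_unchanged_countHomogenous : Prop := ∀ (s : String), Dom_countHomogenous s → Spec_countHomogenous s (countHomogenous s)
def Claim_changed_countHomogenous : Prop := Dom_countHomogenous (pvDiffWitness_countHomogenous) ∧ D_countHomogenous (pvDiffWitness_countHomogenous) ∧ countHomogenous (pvDiffWitness_countHomogenous) = pvDiffWitnessOut_countHomogenous.1 ∧ countHomogenous_alt (pvDiffWitness_countHomogenous) = pvDiffWitnessOut_countHomogenous.2 ∧ pvDiffWitnessOut_countHomogenous.1 ≠ pvDiffWitnessOut_countHomogenous.2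

-- ===== LEMMAS AND PROOFS =====

lemma runLen_spec (c : Char) (xs : List Char) :
    xs = List.replicate (runLen c xs).1 c ++ (runLen c xs).2 ∧
      ∀ y, (runLen c xs).2.head? = some y → y ≠ c := by
  induction xs with
  | nil => simp [runLen]
  | cons x xs ih =>
    have hr : runLen c (x :: xs)
        = if x = c then ((runLen c xs).1 + 1, (runLen c xs).2) else (0, x :: xs) := rfl
    by_cases hx : x = c
    · subst hx
      rw [hr, if_pos rfl]
      refine ⟨?_, ih.2⟩
      simp only [List.replicate_succ, List.cons_append]
      exact congrArg (x :: ·) ih.1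
    · rw [hr, if_neg hx]
      exact ⟨rfl, by intro y hy; simp at hy; subst hy; exact hx⟩

lemma aLoop_run (c y : Char) (hyc : y ≠ c) :
    ∀ (n : Nat) (d : PySem.Dict (List Char) Int) (temp tail : List Char),
      aLoop d temp (List.replicate (n + 1) c ++ y :: tail)
        = aLoop (PySem.Dict.insert d (temp ++ List.replicate (n + 1) c)
            (1 + PySem.Dict.getD d (temp ++ List.replicate (n + 1) c) 0)) [] (y :: tail) := by
  intro n
  induction n with
  | zero =>
    intro d temp tail
    simp only [List.replicate_succ, List.replicate_zero, List.nil_append, List.cons_append]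
    rw [aLoop, if_neg (fun h => hyc h.symm)]
  | succ n ih =>
    intro d temp tail
    have h2 : List.replicate (n + 2) c ++ y :: tail
        = c :: (List.replicate (n + 1) c ++ y :: tail) := by
      simp [List.replicate_succ]
    rw [h2]
    have h3 : List.replicate (n + 1) c ++ y :: tail
        = c :: (List.replicate n c ++ y :: tail) := by
      simp [List.replicate_succ]
    rw [h3, aLoop, if_pos rfl, ← h3, ih]
    have h4 : (temp ++ [c]) ++ List.replicate (n + 1) c = temp ++ List.replicate (n + 2) c := by
      simp [List.replicate_succ, List.append_assoc]
    rw [h4]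

-- the key map (char, length) -> run string
def keyF (r : Char × Nat) : List Char := List.replicate r.2 r.1

-- A's per-run dict update (on run-string keys) and B's (on (char, length) keys)
def updA (d : PySem.Dict (List Char) Int) (r : Char × Nat) : PySem.Dict (List Char) Int :=
  PySem.Dict.insert d (keyF r) (1 + PySem.Dict.getD d (keyF r) 0)
def updB (d : PySem.Dict (Char × Nat) Int) (r : Char × Nat) : PySem.Dict (Char × Nat) Int :=
  PySem.Dict.insert d r (PySem.Dict.getD d r 0 + 1)

lemma getLast?_append_cons : ∀ (l₁ : List Char) (y : Char) (r : List Char),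
    (l₁ ++ y :: r).getLast? = (y :: r).getLast? := by
  intro l₁
  induction l₁ with
  | nil => intro y r; rfl
  | cons a l ih =>
    intro y r
    rw [List.cons_append]
    cases hl : l ++ y :: r with
    | nil => exact absurd hl (by simp)
    | cons b t =>
      rw [List.getLast?_cons_cons, ← hl, ih]

lemma aLoop_eq_foldl_runs :
    ∀ (l : List Char), l.getLast? ≠ some ' ' → ∀ (d : PySem.Dict (List Char) Int),
      aLoop d [] (l ++ [' ']) = (runsOf l).foldl updA d := by
  intro l
  induction l using runsOf.induct with
  | case1 => intro _ d; simp [aLoop, runsOf]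
  | case2 c rest ih =>
    intro h d
    obtain ⟨hdec, hhead⟩ := runLen_spec c rest
    cases hr : (runLen c rest).2 with
    | nil =>
      rw [hr, List.append_nil] at hdec
      have hl : c :: rest = List.replicate ((runLen c rest).1 + 1) c := by
        rw [List.replicate_succ]; exact congrArg (c :: ·) hdec
      have hc : c ≠ ' ' := by
        intro hc
        apply h
        rw [hl, List.replicate_succ']
        rw [List.getLast?_concat, hc]
      have hsp : (c :: rest) ++ [' '] = List.replicate ((runLen c rest).1 + 1) c ++ ' ' :: [] := by
        rw [hl]
      rw [hsp, aLoop_run c ' ' (Ne.symm hc)]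
      have hstop : ∀ d' : PySem.Dict (List Char) Int, aLoop d' [] [' '] = d' := fun _ => rfl
      rw [hstop]
      simp only [runsOf, hr, List.foldl_cons, List.foldl_nil, updA, keyF, List.nil_append]
    | cons y r' =>
      have hy : y ≠ c := hhead y (by rw [hr]; rfl)
      have hsplit : (c :: rest) ++ [' ']
          = List.replicate ((runLen c rest).1 + 1) c ++ y :: (r' ++ [' ']) := by
        conv_lhs => rw [hdec]
        rw [hr]
        simp [List.replicate_succ, List.append_assoc]
      rw [hsplit, aLoop_run c y hy]
      have h2 : y :: (r' ++ [' ']) = (y :: r') ++ [' '] := rfl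
      rw [h2]
      have hlast' : (y :: r').getLast? ≠ some ' ' := by
        intro hcontra
        apply h
        have hsp2 : c :: rest = List.replicate ((runLen c rest).1 + 1) c ++ (y :: r') := by
          conv_lhs => rw [hdec]
          rw [hr]
          simp [List.replicate_succ]
        rw [hsp2, getLast?_append_cons]
        exact hcontra
      rw [← hr] at hlast'
      rw [← hr, ih hlast']
      simp only [runsOf, List.foldl_cons, updA, keyF, List.nil_append]

def mapD (d : PySem.Dict (Char × Nat) Int) : PySem.Dict (List Char) Int :=
  ⟨d.items.map (fun p => (keyF p.1, p.2))⟩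

lemma keyF_inj {p q : Char × Nat} (hp : 1 ≤ p.2) (hq : 1 ≤ q.2) (h : keyF p = keyF q) : p = q := by
  obtain ⟨a, m⟩ := p
  obtain ⟨b, k⟩ := q
  have hm : m = k := by
    have := congrArg List.length h
    simpa [keyF] using this
  subst hm
  cases m with
  | zero => omega
  | succ m =>
    simp only [keyF, List.replicate_succ, List.cons.injEq] at h
    simp [h.1]

lemma keyF_beq_false {p k : Char × Nat} (hp : 1 ≤ p.2) (hk : 1 ≤ k.2) (hne : p ≠ k) :
    (keyF p == keyF k) = false := by
  rw [beq_eq_false_iff_ne]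
  intro hEq
  exact hne (keyF_inj hp hk hEq)

lemma find?_map_keyF (k : Char × Nat) (hk : 1 ≤ k.2) :
    ∀ (l : List ((Char × Nat) × Int)), (∀ p ∈ l, 1 ≤ p.1.2) →
      List.find? (fun p => p.1 == keyF k) (l.map (fun p => (keyF p.1, p.2)))
        = Option.map (fun p => (keyF p.1, p.2)) (List.find? (fun p => p.1 == k) l) := by
  intro l
  induction l with
  | nil => intro _; rfl
  | cons p l ih =>
    intro hpos
    by_cases hpk : p.1 = k
    · subst hpk
      rw [List.map_cons, List.find?_cons_of_pos (by simp), List.find?_cons_of_pos (by simp)]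
      rfl
    · have hb2 : (keyF p.1 == keyF k) = false := keyF_beq_false (hpos p (by simp)) hk hpk
      rw [List.map_cons, List.find?_cons_of_neg (by simp [hb2]),
        List.find?_cons_of_neg (by simpa using hpk)]
      exact ih (fun q hq => hpos q (by simp [hq]))

lemma get?_mapD (d : PySem.Dict (Char × Nat) Int) (k : Char × Nat)
    (hpos : ∀ p ∈ d.items, 1 ≤ p.1.2) (hk : 1 ≤ k.2) :
    (mapD d).get? (keyF k) = d.get? k := by
  simp only [PySem.Dict.get?, mapD, find?_map_keyF k hk d.items hpos]
  cases List.find? (fun p => p.1 == k) d.items <;> rfl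

lemma any_eq_isSome_find? {α : Type} (pred : α → Bool) :
    ∀ l : List α, l.any pred = (List.find? pred l).isSome := by
  intro l
  induction l with
  | nil => rfl
  | cons a l ih =>
    by_cases h : pred a = true
    · rw [List.any_cons, List.find?_cons_of_pos h]
      simp [h]
    · rw [List.any_cons, List.find?_cons_of_neg (by simp [h])]
      simp [h, ih]

lemma contains_mapD (d : PySem.Dict (Char × Nat) Int) (k : Char × Nat)
    (hpos : ∀ p ∈ d.items, 1 ≤ p.1.2) (hk : 1 ≤ k.2) :
    (mapD d).contains (keyF k) = d.contains k := by
  have h1 : ∀ (dd : PySem.Dict (List Char) Int) (kk : List Char),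
      dd.contains kk = (dd.get? kk).isSome := by
    intro dd kk
    simp [PySem.Dict.contains, PySem.Dict.get?, Option.isSome_map, any_eq_isSome_find?]
  have h2 : ∀ (dd : PySem.Dict (Char × Nat) Int) (kk : Char × Nat),
      dd.contains kk = (dd.get? kk).isSome := by
    intro dd kk
    simp [PySem.Dict.contains, PySem.Dict.get?, Option.isSome_map, any_eq_isSome_find?]
  rw [h1, h2, get?_mapD d k hpos hk]

lemma insert_mapD (d : PySem.Dict (Char × Nat) Int) (k : Char × Nat) (v : Int)
    (hpos : ∀ p ∈ d.items, 1 ≤ p.1.2) (hk : 1 ≤ k.2) :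
    mapD (d.insert k v) = (mapD d).insert (keyF k) v := by
  simp only [PySem.Dict.insert, contains_mapD d k hpos hk]
  by_cases hc : d.contains k
  · rw [if_pos hc, if_pos hc]
    simp only [mapD, PySem.Dict.mk.injEq, List.map_map]
    apply List.map_congr_left
    intro p hp
    by_cases hpk : p.1 = k
    · simp [hpk]
    · have hne : keyF p.1 ≠ keyF k := fun hEq => hpk (keyF_inj (hpos p hp) hk hEq)
      simp [hpk, hne]
  · rw [if_neg hc, if_neg hc]
    simp [mapD]

lemma items_insert_pos (d : PySem.Dict (Char × Nat) Int) (k : Char × Nat) (v : Int)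
    (hpos : ∀ p ∈ d.items, 1 ≤ p.1.2) (hk : 1 ≤ k.2) :
    ∀ p ∈ (d.insert k v).items, 1 ≤ p.1.2 := by
  intro p hp
  by_cases hc : d.contains k
  · simp only [PySem.Dict.insert, if_pos hc] at hp
    obtain ⟨q, hq, rfl⟩ := List.mem_map.1 hp
    by_cases hqk : (q.1 == k) = true
    · simp [hqk, hk]
    · simp only [hqk, Bool.false_eq_true, if_false]
      exact hpos q hq
  · simp only [PySem.Dict.insert, if_neg hc] at hp
    rcases List.mem_append.1 hp with hq | hq
    · exact hpos p hq
    · simp at hq; subst hq; exact hk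

lemma foldl_mapD :
    ∀ (rs : List (Char × Nat)) (d : PySem.Dict (Char × Nat) Int),
      (∀ p ∈ d.items, 1 ≤ p.1.2) → (∀ r ∈ rs, 1 ≤ r.2) →
      rs.foldl updA (mapD d) = mapD (rs.foldl updB d) := by
  intro rs
  induction rs with
  | nil => intro d _ _; simp
  | cons r rs ih =>
    intro d hpos hrs
    have hr : 1 ≤ r.2 := hrs r (by simp)
    have hget : (mapD d).getD (keyF r) 0 = d.getD r 0 := by
      simp only [PySem.Dict.getD, get?_mapD d r hpos hr]
    have hstep : updA (mapD d) r = mapD (updB d r) := by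
      simp only [updA, updB]
      rw [hget, show (1 : Int) + d.getD r 0 = d.getD r 0 + 1 from add_comm _ _]
      exact (insert_mapD d r _ hpos hr).symm
    simp only [List.foldl_cons, hstep]
    exact ih (updB d r) (items_insert_pos d r _ hpos hr) (fun x hx => hrs x (by simp [hx]))

lemma runs_pos : ∀ (l : List Char), ∀ r ∈ runsOf l, 1 ≤ r.2 := by
  intro l
  induction l using runsOf.induct with
  | case1 => simp [runsOf]
  | case2 c rest ih =>
    simp only [runsOf]
    intro r hr
    rcases List.mem_cons.1 hr with hh | ht
    · subst hh; simp
    · exact ih r ht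

lemma foldl_sum_map (l : List ((Char × Nat) × Int)) : ∀ (init : Int),
    (l.map (fun p => (keyF p.1, p.2))).foldl
      (fun ans p => ans + PySem.Int.mod
        (p.2 * PySem.Int.floordiv ((p.1.length : Int) * ((p.1.length : Int) + 1)) 2) 1000000007) init
    = l.foldl
      (fun acc p => acc + PySem.Int.mod
        (p.2 * PySem.Int.floordiv ((p.1.2 : Int) * ((p.1.2 : Int) + 1)) 2) 1000000007) init := by
  induction l with
  | nil => intro _; rfl
  | cons p l ih =>
    intro init
    simp only [List.map_cons, List.foldl_cons]
    rw [ih]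
    congr 2
    simp [keyF]

-- ===== VERDICT (by name: the statement is the Claim_ definition above) =====
theorem countHomogenous_spec : Claim_unchanged_countHomogenous := by
  intro s _hDom hD
  have hlast : s.toList.getLast? ≠ some ' ' := hD
  show countHomogenous s = countHomogenous_alt s
  show (aLoop PySem.Dict.empty [] (s.toList ++ [' '])).items.foldl
      (fun ans p => ans + PySem.Int.mod
        (p.2 * PySem.Int.floordiv ((p.1.length : Int) * ((p.1.length : Int) + 1)) 2) 1000000007) 0
    = ((runsOf s.toList).foldl updB PySem.Dict.empty).items.foldl
      (fun acc p => acc + PySem.Int.mod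
        (p.2 * PySem.Int.floordiv ((p.1.2 : Int) * ((p.1.2 : Int) + 1)) 2) 1000000007) 0
  have hpos0 : ∀ p ∈ (PySem.Dict.empty : PySem.Dict (Char × Nat) Int).items, 1 ≤ p.1.2 := by
    intro p hp
    simp [PySem.Dict.empty] at hp
  rw [aLoop_eq_foldl_runs s.toList hlast PySem.Dict.empty,
    show (PySem.Dict.empty : PySem.Dict (List Char) Int) = mapD PySem.Dict.empty from rfl,
    foldl_mapD _ _ hpos0 (runs_pos _)]
  exact foldl_sum_map _ 0

theorem countHomogenous_changed : Claim_changed_countHomogenous := by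
  unfold Claim_changed_countHomogenous
  refine ⟨by decide, by decide, by decide, ?_, by decide⟩
  show countHomogenous_alt " " = 1
  have h1 : runsOf (String.toList " ") = [(' ', 1)] := by
    show runsOf [' '] = [(' ', 1)]
    simp [runsOf, runLen]
  show ((runsOf (String.toList " ")).foldl
      (fun (d : PySem.Dict (Char × Nat) Int) r => PySem.Dict.insert d r (PySem.Dict.getD d r 0 + 1))
      PySem.Dict.empty).items.foldl
      (fun acc p => acc + PySem.Int.mod
        (p.2 * PySem.Int.floordiv ((p.1.2 : Int) * ((p.1.2 : Int) + 1)) 2) 1000000007) 0 = 1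
  rw [h1]
  decide
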